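-- pv_equiv track=rewrite | github.com/AlJohri/practice | codility/MaxCounters.py | slow_solution2
-- ===== SOURCE A (Python) =====
-- def slow_solution2(N, A):
--     counters = [0] * N
--     max_counter = 0
--     for K,X in enumerate(A):
--         if 1 <= X <= N:
--             counters[X-1] += 1
--             max_counter = max(max_counter, counters[X-1])
--         elif A[K] == (N + 1):
--             counters = [max_counter] * N
--     return counters
-- ===== SOURCE B (Python) =====
-- def slow_solution2(N, A):
--     # Counts since the last reset live in a dict keyed by counter number;
--     # a reset just records the current max as a base and clears the dict.
--     base = 0
--     cur_max = 0
--     since = {}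
--     for X in A:
--         if 1 <= X <= N:
--             c = since.get(X, 0) + 1
--             since[X] = c
--             if base + c > cur_max:
--                 cur_max = base + c
--         elif X == N + 1:
--             base = cur_max
--             since = {}
--     return [base + since.get(i, 0) for i in range(1, N + 1)]
-- ===== Notes on version B (the rewrite author's own statement) =====
-- stated objective: alternative
-- what changed: Replaces the size-N counters list (rewritten wholesale on every max-counter op, and indexed on every increment) by a dict of counts since the last reset plus a base value; resets just record the base and clear the dict, and the result list is built once at the end.
import Mathlib
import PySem

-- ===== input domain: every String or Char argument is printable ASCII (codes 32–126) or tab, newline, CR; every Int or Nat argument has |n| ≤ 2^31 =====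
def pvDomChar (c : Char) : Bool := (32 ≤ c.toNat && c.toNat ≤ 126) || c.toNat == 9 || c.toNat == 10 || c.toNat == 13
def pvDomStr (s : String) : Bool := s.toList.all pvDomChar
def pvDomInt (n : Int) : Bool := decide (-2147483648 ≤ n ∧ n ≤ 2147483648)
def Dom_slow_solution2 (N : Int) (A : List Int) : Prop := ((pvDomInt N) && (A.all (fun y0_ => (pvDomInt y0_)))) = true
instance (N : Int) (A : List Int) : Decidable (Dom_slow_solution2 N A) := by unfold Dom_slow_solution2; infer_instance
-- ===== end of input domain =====

-- B replaces the size-N counters array (rewritten wholesale on each max-counter op) by a dict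
-- of counts since the last reset plus a base value; the result list is built once at the end.

-- ===== PORT A =====
-- one loop step of A; KX is the (K, X) pair from enumerate(A).
-- In the elif, Python reads A[K]; since K is the current index, A[K] is exactly X,
-- the enumerated element, so the comparison is ported as X = N + 1.
def stepA (N : Int) (s : List Int × Int) (KX : Int × Int) : List Int × Int :=
  let X := KX.2
  if 1 ≤ X ∧ X ≤ N then
    -- counters[X-1] += 1; max_counter = max(max_counter, counters[X-1])
    let v := s.1.getD (X - 1).toNat 0 + 1   -- index in range by the guard
    (s.1.set (X - 1).toNat v, max s.2 v)
  else if X = N + 1 then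
    (List.replicate N.toNat s.2, s.2)       -- counters = [max_counter] * N
  else s

def slow_solution2 (N : Int) (A : List Int) : List Int :=
  ((PySem.List.enumerate A 0).foldl (stepA N) (List.replicate N.toNat 0, 0)).1

-- ===== PORT B =====
-- one loop step of B; state = (since, base, cur_max)
def stepB (N : Int) (s : PySem.Dict Int Int × Int × Int) (X : Int) :
    PySem.Dict Int Int × Int × Int :=
  if 1 ≤ X ∧ X ≤ N then
    let c := s.1.getD X 0 + 1                -- c = since.get(X, 0) + 1; since[X] = c
    (s.1.insert X c, s.2.1, if s.2.1 + c > s.2.2 then s.2.1 + c else s.2.2)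
  else if X = N + 1 then
    (PySem.Dict.empty, s.2.2, s.2.2)         -- base = cur_max; since = {}
  else s

def slow_solution2_alt (N : Int) (A : List Int) : List Int :=
  let st := A.foldl (stepB N) (PySem.Dict.empty, 0, 0)
  -- [base + since.get(i, 0) for i in range(1, N + 1)]
  (PySem.List.pyRange 1 (N + 1) 1).map (fun i => st.2.1 + st.1.getD i 0)

-- ===== PRECONDITION & SPEC =====
def Spec_slow_solution2 (N : Int) (A : List Int) (out : List Int) : Prop := out = slow_solution2_alt N A
instance (N : Int) (A : List Int) (out : List Int) : Decidable (Spec_slow_solution2 N A out) := by unfold Spec_slow_solution2; infer_instance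

-- ===== CLAIM (what is proved, stated in full; the proofs are below) =====
def Claim_equal_slow_solution2 : Prop := ∀ (N : Int) (A : List Int), Dom_slow_solution2 N A → Spec_slow_solution2 N A (slow_solution2 N A)

-- ===== LEMMAS AND PROOFS =====

-- a constant comprehension over range(1, N+1) is [c] * N
theorem pvMapConstPyRange (N c : Int) :
    (PySem.List.pyRange 1 (N + 1) 1).map (fun _ => c) = List.replicate N.toNat c := by
  rw [List.map_const', PySem.List.length_pyRange_one]
  congr 1
  omega

-- the coupling invariant between A's state and B's state (since, base, cur_max)
def pvInvAB (N : Int) (sA : List Int × Int) (sB : PySem.Dict Int Int × Int × Int) : Prop :=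
  sA.1 = (PySem.List.pyRange 1 (N + 1) 1).map (fun i => sB.2.1 + sB.1.getD i 0) ∧
  sA.2 = sB.2.2 ∧
  sB.2.1 ≤ sB.2.2 ∧
  (∀ i ∈ PySem.List.pyRange 1 (N + 1) 1, sB.2.1 + sB.1.getD i 0 ≤ sB.2.2)

theorem inv_step (N : Int) (sA : List Int × Int) (sB : PySem.Dict Int Int × Int × Int) (X : Int)
    (h : pvInvAB N sA sB) : pvInvAB N (stepA N sA (0, X)) (stepB N sB X) := by
  obtain ⟨h1, h2, h3, h4⟩ := h
  unfold pvInvAB stepA stepB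
  by_cases hg : 1 ≤ X ∧ X ≤ N
  · have hmemX : X ∈ PySem.List.pyRange 1 (N + 1) 1 := by
      rw [PySem.List.mem_pyRange_one]; omega
    have hlen : (PySem.List.pyRange 1 (N + 1) 1).length = N.toNat := by
      rw [PySem.List.length_pyRange_one]; omega
    have hjlt : (X - 1).toNat < (PySem.List.pyRange 1 (N + 1) 1).length := by
      rw [hlen]; omega
    have hatj : (PySem.List.pyRange 1 (N + 1) 1)[(X - 1).toNat]'hjlt = X := by
      rw [PySem.List.getElem_pyRange_one]; omega
    have hget : sA.1.getD (X - 1).toNat 0 = sB.2.1 + sB.1.getD X 0 := by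
      rw [h1, List.getD_eq_getElem?_getD, List.getElem?_map,
          List.getElem?_eq_getElem hjlt, hatj]
      simp
    have hget' : ((PySem.List.pyRange 1 (N + 1) 1).map
        (fun i => sB.2.1 + sB.1.getD i 0)).getD (X - 1).toNat 0 = sB.2.1 + sB.1.getD X 0 := by
      rw [← h1]; exact hget
    simp only [if_pos hg]
    refine ⟨?_, ?_, ?_, ?_⟩ <;> dsimp only
    · rw [h1]
      apply List.ext_getElem
      · simp
      · intro k hk1 hk2
        have hk : k < (PySem.List.pyRange 1 (N + 1) 1).length := by simpa using hk2
        have hatk := PySem.List.getElem_pyRange_one 1 (N + 1) k hk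
        by_cases hkj : k = (X - 1).toNat
        · subst hkj
          rw [List.getElem_set_self, List.getElem_map, hatj,
              PySem.Dict.getD_insert, if_pos rfl, hget']
          omega
        · rw [List.getElem_set_ne (by omega), List.getElem_map, List.getElem_map, hatk,
              PySem.Dict.getD_insert, if_neg (by omega : ¬ (1:Int) + k = X)]
    · rw [h2, hget]
      split_ifs <;> omega
    · split_ifs <;> omega
    · intro i hi
      rw [PySem.Dict.getD_insert]
      have := h4 i hi
      split_ifs <;> omega
  · simp only [if_neg hg]
    by_cases he : X = N + 1
    · simp only [if_pos he]
      refine ⟨?_, h2, le_refl _, ?_⟩ <;> dsimp only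
      · rw [h2, List.map_congr_left (g := fun _ => sB.2.2)
              (fun i _ => by simp [PySem.Dict.getD_empty]),
            pvMapConstPyRange]
      · intro i _
        simp [PySem.Dict.getD_empty]
    · simp only [if_neg he]
      exact ⟨h1, h2, h3, h4⟩

theorem inv_foldl (N : Int) (A : List Int) (sA : List Int × Int)
    (sB : PySem.Dict Int Int × Int × Int) (h : pvInvAB N sA sB) :
    pvInvAB N (A.foldl (fun s x => stepA N s (0, x)) sA) (A.foldl (stepB N) sB) := by
  induction A generalizing sA sB with
  | nil => exact h
  | cons x xs ih => exact ih _ _ (inv_step N sA sB x h)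

-- A's fold over enumerate(A) ignores the index component, so it is a fold over A itself
theorem foldA_enum (N : Int) (A : List Int) (init : List Int × Int) :
    (PySem.List.enumerate A 0).foldl (stepA N) init
      = A.foldl (fun s x => stepA N s (0, x)) init := by
  conv_rhs => rw [← PySem.List.map_snd_enumerate (xs := A) (s := 0)]
  rw [List.foldl_map]
  exact PySem.List.foldl_congr_mem _ _ _ _ (fun s p _ => rfl)

-- ===== VERDICT (by name: the statement is the Claim_ definition above) =====
theorem slow_solution2_spec : Claim_equal_slow_solution2 := by
  intro N A _
  unfold Spec_slow_solution2 slow_solution2 slow_solution2_alt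
  rw [foldA_enum]
  have h0 : pvInvAB N (List.replicate N.toNat 0, 0) (PySem.Dict.empty, 0, 0) := by
    refine ⟨?_, rfl, le_refl _, ?_⟩
    · rw [List.map_congr_left (g := fun _ => (0 : Int))
            (fun i _ => by simp [PySem.Dict.getD_empty]),
          pvMapConstPyRange]
    · intro i _
      simp [PySem.Dict.getD_empty]
  exact (inv_foldl N A _ _ h0).1
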